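-- pv_equiv track=rewrite | github.com/microsoft/ML-For-Beginners | .venv/Lib/site-packages/nltk/tbl/erroranalysis.py | error_list
-- ===== SOURCE A (Python) =====
-- def error_list(train_sents, test_sents):
--     """
--     Returns a list of human-readable strings indicating the errors in the
--     given tagging of the corpus.
--
--     :param train_sents: The correct tagging of the corpus
--     :type train_sents: list(tuple)
--     :param test_sents: The tagged corpus
--     :type test_sents: list(tuple)
--     """
--     hdr = ("%25s | %s | %s\n" + "-" * 26 + "+" + "-" * 24 + "+" + "-" * 26) % (
--         "left context",
--         "word/test->gold".center(22),
--         "right context",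
--     )
--     errors = [hdr]
--     for (train_sent, test_sent) in zip(train_sents, test_sents):
--         for wordnum, (word, train_pos) in enumerate(train_sent):
--             test_pos = test_sent[wordnum][1]
--             if train_pos != test_pos:
--                 left = " ".join("%s/%s" % w for w in train_sent[:wordnum])
--                 right = " ".join("%s/%s" % w for w in train_sent[wordnum + 1 :])
--                 mid = f"{word}/{test_pos}->{train_pos}"
--                 errors.append(f"{left[-25:]:>25} | {mid.center(22)} | {right[:25]}")
--
--     return errors
-- ===== SOURCE B (Python) =====
-- def error_list(train_sents, test_sents):
--     """Same rows as the original, but each sentence is joined ONCE into a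
--     single string; a running character offset then lets every error row be
--     produced by two O(1) slices of that string instead of re-joining the
--     sentence prefix/suffix per error."""
--     hdr = ("%25s | %s | %s\n" + "-" * 26 + "+" + "-" * 24 + "+" + "-" * 26) % (
--         "left context",
--         "word/test->gold".center(22),
--         "right context",
--     )
--     errors = [hdr]
--     for train_sent, test_sent in zip(train_sents, test_sents):
--         full = " ".join("%s/%s" % w for w in train_sent)
--         pos = 0
--         for (word, gold), (_, guess) in zip(train_sent, test_sent):
--             tlen = len(word) + len(gold) + 1
--             if gold != guess:
--                 left = full[max(pos - 26, 0):max(pos - 1, 0)]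
--                 right = full[pos + tlen + 1:pos + tlen + 26]
--                 mid = f"{word}/{guess}->{gold}"
--                 errors.append(f"{left:>25} | {mid.center(22)} | {right}")
--             pos += tlen + 1
--     return errors
-- ===== Notes on version B (the rewrite author's own statement) =====
-- stated objective: faster
-- what changed: Instead of re-joining the whole sentence prefix and suffix for every error row and then slicing, B joins each sentence into one string once and keeps a running character offset per token, so each error row is produced by two O(1) arithmetic slices of that pre-joined string; B also walks train/test sentences with zip instead of indexing test_sent[wordnum].
import Mathlib
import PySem

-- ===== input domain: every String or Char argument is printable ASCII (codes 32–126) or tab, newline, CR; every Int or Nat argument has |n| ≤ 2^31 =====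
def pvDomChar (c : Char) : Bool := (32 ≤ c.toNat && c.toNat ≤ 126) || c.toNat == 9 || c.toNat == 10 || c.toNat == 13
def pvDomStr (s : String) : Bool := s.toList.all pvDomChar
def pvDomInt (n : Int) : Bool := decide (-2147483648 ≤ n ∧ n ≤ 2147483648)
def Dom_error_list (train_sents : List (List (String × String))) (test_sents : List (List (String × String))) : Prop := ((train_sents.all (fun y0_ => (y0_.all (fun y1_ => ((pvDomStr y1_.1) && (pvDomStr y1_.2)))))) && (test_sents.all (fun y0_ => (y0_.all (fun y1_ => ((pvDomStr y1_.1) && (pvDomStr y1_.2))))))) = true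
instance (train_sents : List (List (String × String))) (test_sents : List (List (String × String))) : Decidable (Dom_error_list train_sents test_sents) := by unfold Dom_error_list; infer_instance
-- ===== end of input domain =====

-- B joins each sentence into ONE string and keeps a running character offset,
-- so every error row is two O(1) slices of that string instead of a fresh
-- join of the sentence prefix/suffix per error (objective: faster).

-- shared formatting helpers (the same Python built-ins appear in both sources):
-- the constant header string (hdr is a fixed expression with no inputs)
def pvHdr : String := "             left context |    word/test->gold     | right context\n--------------------------+------------------------+--------------------------"
-- "%s/%s" % w  (A)  /  f"{w}/{p}"  (B)
def pvTok (wt : String × String) : String := wt.1 ++ "/" ++ wt.2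
-- f"{s:>25}" : pad with spaces on the left to width 25 (exact)
def pvRjust (s : String) : String := String.ofList (List.replicate (25 - s.toList.length) ' ') ++ s
-- s.center(22) : CPython puts ⌊marg/2⌋ spaces left for even width (exact for width 22)
def pvCenter (s : String) : String :=
  if 22 ≤ s.toList.length then s
  else String.ofList (List.replicate ((22 - s.toList.length) / 2) ' ') ++ s ++
       String.ofList (List.replicate ((22 - s.toList.length) - (22 - s.toList.length) / 2) ' ')

-- ===== PORT A =====
def error_list (train_sents : List (List (String × String))) (test_sents : List (List (String × String))) : List String :=
  (train_sents.zip test_sents).foldl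
    (fun errors pr =>
      (PySem.List.enumerate pr.1).foldl
        (fun errors e =>
          let wordnum := e.1
          let word := e.2.1
          let train_pos := e.2.2
          -- test_sent[wordnum][1]; wordnum is in range under Pre_error_list
          let test_pos := (PySem.List.pyGetD pr.2 wordnum ("", "")).2
          if train_pos ≠ test_pos then
            let left := PySem.Str.join " " ((PySem.List.slice pr.1 none (some wordnum)).map pvTok)
            let right := PySem.Str.join " " ((PySem.List.slice pr.1 (some (wordnum + 1)) none).map pvTok)
            let mid := word ++ "/" ++ test_pos ++ "->" ++ train_pos
            errors ++ [pvRjust (PySem.Str.slice left (some (-25)) none) ++ " | " ++ pvCenter mid ++ " | " ++ PySem.Str.slice right none (some 25)]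
          else errors)
        errors)
    [pvHdr]

-- ===== PORT B =====
-- the inner zip loop of Source B: walk the two sentences in step, keeping the running
-- character offset `pos` of the current token inside the pre-joined string `full`
def pvRows (full : String) : List (String × String) → List (String × String) → Int → List String
  | [], _, _ => []
  | _ :: _, [], _ => []
  | (word, gold) :: ts, (_, guess) :: us, pos =>
    let tlen : Int := PySem.Str.len word + PySem.Str.len gold + 1
    let rest := pvRows full ts us (pos + tlen + 1)
    if gold ≠ guess then
      (pvRjust (PySem.Str.slice full (some (max (pos - 26) 0)) (some (max (pos - 1) 0))) ++ " | " ++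
        pvCenter (word ++ "/" ++ guess ++ "->" ++ gold) ++ " | " ++
        PySem.Str.slice full (some (pos + tlen + 1)) (some (pos + tlen + 26))) :: rest
    else rest

def error_list_alt (train_sents : List (List (String × String))) (test_sents : List (List (String × String))) : List String :=
  (train_sents.zip test_sents).foldl
    (fun errors pr =>
      let full := PySem.Str.join " " (pr.1.map pvTok)
      errors ++ pvRows full pr.1 pr.2 0)
    [pvHdr]

-- ===== PRECONDITION & SPEC =====
-- Pre_ excludes exactly the inputs where A raises IndexError: a zipped test sentence
-- shorter than its train sentence.
def Pre_error_list (train_sents : List (List (String × String))) (test_sents : List (List (String × String))) : Prop :=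
  ∀ pr ∈ train_sents.zip test_sents, pr.1.length ≤ pr.2.length
instance (train_sents : List (List (String × String))) (test_sents : List (List (String × String))) : Decidable (Pre_error_list train_sents test_sents) := by unfold Pre_error_list; infer_instance
def pvWitness_error_list : (List (List (String × String))) × (List (List (String × String))) :=
  ([[("The", "DT"), ("cat", "NN")]], [[("The", "DT"), ("cat", "VB")]])

def Spec_error_list (train_sents : List (List (String × String))) (test_sents : List (List (String × String))) (out : List String) : Prop := out = error_list_alt train_sents test_sents
instance (train_sents : List (List (String × String))) (test_sents : List (List (String × String))) (out : List String) : Decidable (Spec_error_list train_sents test_sents out) := by unfold Spec_error_list; infer_instance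

-- ===== CLAIM (what is proved, stated in full; the proofs are below) =====
def Claim_equal_error_list : Prop := ∀ (train_sents : List (List (String × String))) (test_sents : List (List (String × String))), Dom_error_list train_sents test_sents → Pre_error_list train_sents test_sents → Spec_error_list train_sents test_sents (error_list train_sents test_sents)

-- ===== LEMMAS AND PROOFS =====

-- the token list of a sentence, as char lists, and the joined sentence string
def pvToks (t : List (String × String)) : List (List Char) := t.map (fun w => (pvTok w).toList)
def pvS (t : List (String × String)) : List Char := PySem.Chars.join [' '] (pvToks t)
-- character offset of token j inside pvS (each earlier token contributes len+1)
def pvOff (t : List (String × String)) (j : Nat) : Nat :=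
  (((pvToks t).take j).map (fun c => c.length + 1)).sum

theorem pv_toks_length (t : List (String × String)) : (pvToks t).length = t.length := by
  simp [pvToks]

theorem pv_toks_take (t : List (String × String)) (j : Nat) :
    pvToks (t.take j) = (pvToks t).take j := by
  simp [pvToks, List.map_take]

theorem pv_toks_drop (t : List (String × String)) (j : Nat) :
    pvToks (t.drop j) = (pvToks t).drop j := by
  simp [pvToks, List.map_drop]

-- length of a " "-join of a nonempty token list
theorem pv_join_len (ss : List (List Char)) (h : ss ≠ []) :
    (PySem.Chars.join [' '] ss).length = (ss.map List.length).sum + (ss.length - 1) := by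
  induction ss with
  | nil => simp at h
  | cons p rest ih =>
    cases rest with
    | nil => simp [PySem.Chars.join_singleton]
    | cons q rs =>
      have hih := ih (by simp)
      rw [PySem.Chars.join_cons_cons, List.length_append, List.length_append, hih]
      simp only [List.map_cons, List.sum_cons, List.length_cons, List.length_nil]
      omega

-- join distributes over append of two nonempty token lists
theorem pv_join_append (us vs : List (List Char)) (hu : us ≠ []) (hv : vs ≠ []) :
    PySem.Chars.join [' '] (us ++ vs) =
      PySem.Chars.join [' '] us ++ [' '] ++ PySem.Chars.join [' '] vs := by
  induction us with
  | nil => simp at hu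
  | cons u us' ih =>
    cases us' with
    | nil =>
      cases vs with
      | nil => simp at hv
      | cons v vs' => simp [PySem.Chars.join_cons_cons, PySem.Chars.join_singleton]
    | cons u' us'' =>
      cases h' : (u' :: us'') ++ vs with
      | nil => simp at h'
      | cons w ws =>
        rw [List.cons_append, h', PySem.Chars.join_cons_cons, ← h', ih (by simp),
          PySem.Chars.join_cons_cons]
        simp [List.append_assoc]

-- (Σ (len+1)) over the first j tokens = (Σ len) + j
theorem pv_off_sum (t : List (String × String)) (j : Nat) (hj : j ≤ t.length) :
    pvOff t j = (((pvToks t).take j).map List.length).sum + j := by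
  unfold pvOff
  have hlen : ((pvToks t).take j).length = j := by
    rw [List.length_take, pv_toks_length]; omega
  generalize (pvToks t).take j = l at hlen
  subst hlen
  induction l with
  | nil => simp
  | cons x xs _ => simp; omega

theorem pv_off_succ (t : List (String × String)) (j : Nat) (hj : j < t.length) :
    pvOff t (j + 1) = pvOff t j + ((pvTok t[j]).toList.length + 1) := by
  unfold pvOff
  rw [List.take_add_one, List.map_append, List.sum_append]
  have : (pvToks t)[j]? = some (pvTok t[j]).toList := by
    rw [List.getElem?_eq_getElem (by rw [pv_toks_length]; omega)]
    simp [pvToks]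
  simp [this]

theorem pv_off_total (t : List (String × String)) (h : t ≠ []) :
    pvOff t t.length = (pvS t).length + 1 := by
  have hne : pvToks t ≠ [] := by simpa [pvToks] using h
  rw [pvS, pv_join_len _ hne, pv_off_sum t t.length le_rfl,
    List.take_of_length_le (by rw [pv_toks_length])]
  have : 1 ≤ (pvToks t).length := List.length_pos_iff.mpr hne
  rw [pv_toks_length] at *
  omega

theorem pv_off_mono (t : List (String × String)) (j k : Nat) (hjk : j ≤ k) :
    pvOff t j ≤ pvOff t k := by
  unfold pvOff
  have h : (pvToks t).take j ++ ((pvToks t).take k).drop j = (pvToks t).take k := by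
    conv_rhs => rw [← List.take_append_drop j ((pvToks t).take k)]
    rw [List.take_take, Nat.min_eq_left hjk]
  rw [← h, List.map_append, List.sum_append]
  exact Nat.le_add_right _ _

theorem pv_off_le (t : List (String × String)) (j : Nat) (hj : j ≤ t.length) :
    pvOff t j ≤ (pvS t).length + 1 := by
  rcases eq_or_ne t [] with rfl | hne
  · have hj0 : j = 0 := by simpa using hj
    subst hj0; simp [pvOff]
  · exact le_trans (pv_off_mono t j t.length hj) (le_of_eq (pv_off_total t hne))

-- the join of the first j tokens is an initial slice of the joined sentence
theorem pv_F1 (t : List (String × String)) (j : Nat) (hj : j ≤ t.length) :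
    PySem.Chars.join [' '] ((pvToks t).take j) = (pvS t).take (pvOff t j - 1) := by
  rcases Nat.eq_zero_or_pos j with rfl | hj0
  · simp [pvOff, PySem.Chars.join_nil]
  rcases eq_or_lt_of_le hj with rfl | hjn
  · rw [List.take_of_length_le (by rw [pv_toks_length]),
      pv_off_total t (by intro h; subst h; simp at hj0)]
    simp [pvS]
  · have hu : (pvToks t).take j ≠ [] := by
      intro h
      have := congrArg List.length h
      rw [List.length_take, pv_toks_length, List.length_nil] at this
      omega
    have hv : (pvToks t).drop j ≠ [] := by
      intro h
      have := congrArg List.length h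
      rw [List.length_drop, pv_toks_length, List.length_nil] at this
      omega
    have hsplit : pvS t = PySem.Chars.join [' '] ((pvToks t).take j) ++ [' '] ++
        PySem.Chars.join [' '] ((pvToks t).drop j) := by
      rw [pvS, ← pv_join_append _ _ hu hv, List.take_append_drop]
    have hlen : (PySem.Chars.join [' '] ((pvToks t).take j)).length = pvOff t j - 1 := by
      rw [pv_join_len _ hu, pv_off_sum t j (le_of_lt hjn), List.length_take, pv_toks_length]
      omega
    rw [hsplit, List.append_assoc, ← hlen, List.take_left]

-- the join of the tokens from j on is a final slice of the joined sentence
theorem pv_F2 (t : List (String × String)) (j : Nat) (hj : j ≤ t.length) :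
    PySem.Chars.join [' '] ((pvToks t).drop j) = (pvS t).drop (pvOff t j) := by
  rcases Nat.eq_zero_or_pos j with rfl | hj0
  · simp [pvOff, pvS]
  rcases eq_or_lt_of_le hj with rfl | hjn
  · rw [List.drop_of_length_le (by rw [pv_toks_length]),
      List.drop_eq_nil_of_le (by rw [pv_off_total t (by intro h; subst h; simp at hj0)]; omega)]
    simp [PySem.Chars.join_nil]
  · have hu : (pvToks t).take j ≠ [] := by
      intro h
      have := congrArg List.length h
      rw [List.length_take, pv_toks_length, List.length_nil] at this
      omega
    have hv : (pvToks t).drop j ≠ [] := by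
      intro h
      have := congrArg List.length h
      rw [List.length_drop, pv_toks_length, List.length_nil] at this
      omega
    have hsplit : pvS t = PySem.Chars.join [' '] ((pvToks t).take j) ++ [' '] ++
        PySem.Chars.join [' '] ((pvToks t).drop j) := by
      rw [pvS, ← pv_join_append _ _ hu hv, List.take_append_drop]
    have hlen : (PySem.Chars.join [' '] ((pvToks t).take j)).length = pvOff t j - 1 := by
      rw [pv_join_len _ hu, pv_off_sum t j (le_of_lt hjn), List.length_take, pv_toks_length]
      omega
    have hpos : 1 ≤ pvOff t j := by
      rw [pv_off_sum t j hj]; omega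
    have hl2 : pvOff t j = (PySem.Chars.join [' '] ((pvToks t).take j) ++ [' ']).length := by
      rw [List.length_append, hlen]; simp; omega
    rw [hsplit, hl2, List.drop_left]

-- list of the joined sentence string
theorem pv_full_toList (t : List (String × String)) :
    (PySem.Str.join " " (t.map pvTok)).toList = pvS t := by
  rw [PySem.Str.toList_join, List.map_map, pvS, pvToks]
  rfl

-- A's left-context slice (join of the prefix, last 25 chars) equals B's
-- arithmetic slice of the pre-joined string
theorem pv_left_eq (t : List (String × String)) (j : Nat) (hj : j ≤ t.length) :
    PySem.Str.slice (PySem.Str.join " " ((PySem.List.slice t none (some (j : Int))).map pvTok))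
        (some (-25)) none =
      PySem.Str.slice (PySem.Str.join " " (t.map pvTok))
        (some (max ((pvOff t j : Int) - 26) 0)) (some (max ((pvOff t j : Int) - 1) 0)) := by
  apply String.toList_inj.mp
  rw [PySem.Str.toList_slice, PySem.Str.toList_slice, PySem.Chars.slice_eq_listSlice,
    PySem.Chars.slice_eq_listSlice, PySem.List.slice_to_natCast, pv_full_toList (t.take j),
    pv_full_toList t, PySem.List.slice_from_neg_ofNat _ 25 (by omega),
    PySem.List.slice_toNat _ (le_max_right _ _) (le_max_right _ _)]
  have hS : pvS (t.take j) = (pvS t).take (pvOff t j - 1) := by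
    rw [pvS, pv_toks_take]; exact pv_F1 t j hj
  have hle := pv_off_le t j hj
  have ha : (max ((pvOff t j : Int) - 26) 0).toNat = pvOff t j - 26 := by omega
  have hb : (max ((pvOff t j : Int) - 1) 0).toNat = pvOff t j - 1 := by omega
  rw [hS, ha, hb, List.length_take, List.drop_take]
  have h1 : min (pvOff t j - 1) (pvS t).length = pvOff t j - 1 := by omega
  rw [h1]
  congr 1

-- A's right-context slice (join of the suffix, first 25 chars) equals B's
-- arithmetic slice of the pre-joined string
theorem pv_right_eq (t : List (String × String)) (j : Nat) (hj : j + 1 ≤ t.length) :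
    PySem.Str.slice (PySem.Str.join " " ((PySem.List.slice t (some ((j : Int) + 1)) none).map pvTok))
        none (some 25) =
      PySem.Str.slice (PySem.Str.join " " (t.map pvTok))
        (some ((pvOff t (j + 1) : Int))) (some ((pvOff t (j + 1) : Int) + 25)) := by
  apply String.toList_inj.mp
  have hc : ((j : Int) + 1) = ((j + 1 : Nat) : Int) := by push_cast; ring
  rw [PySem.Str.toList_slice, PySem.Str.toList_slice, PySem.Chars.slice_eq_listSlice,
    PySem.Chars.slice_eq_listSlice, hc, PySem.List.slice_from_natCast,
    pv_full_toList (t.drop (j + 1)), pv_full_toList t,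
    PySem.List.slice_to _ (by norm_num : (0:Int) ≤ 25),
    PySem.List.slice_toNat _ (by positivity) (by positivity)]
  have hS : pvS (t.drop (j + 1)) = (pvS t).drop (pvOff t (j + 1)) := by
    rw [pvS, pv_toks_drop]; exact pv_F2 t (j + 1) hj
  have ha : ((pvOff t (j + 1) : Int)).toNat = pvOff t (j + 1) := by omega
  have hb : ((pvOff t (j + 1) : Int) + 25).toNat = pvOff t (j + 1) + 25 := by omega
  rw [hS, ha, hb]
  congr 1
  omega

-- the inner loops agree: A's enumerate-and-index fold from position j equals
-- B's two-list walk over the remaining suffixes with pos = offset of token j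
theorem pv_inner (t g : List (String × String)) (hlen : t.length ≤ g.length) :
    ∀ (suf gsuf : List (String × String)) (j : Nat), t.drop j = suf → g.drop j = gsuf →
      ∀ (errors : List String),
      (PySem.List.enumerate suf (j : Int)).foldl
        (fun errors e =>
          let wordnum := e.1
          let word := e.2.1
          let train_pos := e.2.2
          let test_pos := (PySem.List.pyGetD g wordnum ("", "")).2
          if train_pos ≠ test_pos then
            let left := PySem.Str.join " " ((PySem.List.slice t none (some wordnum)).map pvTok)
            let right := PySem.Str.join " " ((PySem.List.slice t (some (wordnum + 1)) none).map pvTok)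
            let mid := word ++ "/" ++ test_pos ++ "->" ++ train_pos
            errors ++ [pvRjust (PySem.Str.slice left (some (-25)) none) ++ " | " ++ pvCenter mid ++ " | " ++ PySem.Str.slice right none (some 25)]
          else errors)
        errors
      = errors ++ pvRows (PySem.Str.join " " (t.map pvTok)) suf gsuf ((pvOff t j : Int)) := by
  intro suf
  induction suf with
  | nil => intro gsuf j _ _ errors; simp [PySem.List.enumerate, pvRows]
  | cons x rest ih =>
    intro gsuf j hdt hdg errors
    have hjlt : j < t.length := by
      by_contra hc
      rw [List.drop_eq_nil_of_le (by omega)] at hdt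
      exact (List.cons_ne_nil x rest) hdt.symm
    have hdt1 : t.drop (j + 1) = rest := by
      simpa [List.tail_drop] using congrArg List.tail hdt
    have hjg : j < g.length := by omega
    -- the test suffix is nonempty and headed by g[j]
    cases gsuf with
    | nil =>
      exfalso
      have := congrArg List.length hdg
      rw [List.length_drop] at this
      simp at this; omega
    | cons g0 grest =>
      have hdg1 : g.drop (j + 1) = grest := by
        simpa [List.tail_drop] using congrArg List.tail hdg
      have hg0 : g[j] = g0 := by
        have : (g.drop j)[0]'(by rw [hdg]; simp) = g0 := by simp [hdg]
        rwa [List.getElem_drop] at this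
      have hx : t[j] = x := by
        have : (t.drop j)[0]'(by rw [hdt]; simp) = x := by simp [hdt]
        rwa [List.getElem_drop] at this
      have hcast1 : ((j : Int) + 1) = ((j + 1 : Nat) : Int) := by push_cast; ring
      have hgetD : PySem.List.pyGetD g (j : Int) ("", "") = g0 := by
        rw [PySem.List.pyGetD_eq_getElem g ("", "") (by omega) (by exact_mod_cast hjg)]
        simpa using hg0
      rw [PySem.List.enumerate_cons, List.foldl_cons, hcast1, ih grest (j + 1) hdt1 hdg1]
      obtain ⟨word, gold⟩ := x
      obtain ⟨gw, guess⟩ := g0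
      have hsucc : ((pvOff t j : Int)) + (PySem.Str.len word + PySem.Str.len gold + 1) + 1
          = ((pvOff t (j + 1) : Int)) := by
        rw [pv_off_succ t j hjlt, hx, PySem.Str.len_eq, PySem.Str.len_eq]
        have htok : (pvTok (word, gold)).toList.length
            = word.toList.length + gold.toList.length + 1 := by
          simp [pvTok, String.toList_append]
          omega
        rw [htok]; push_cast; ring
      simp only [hgetD, pvRows]
      by_cases hne : gold ≠ guess
      · rw [if_pos hne, if_pos hne, hsucc,
          pv_left_eq t j (by omega), pv_right_eq t j (by omega)]
        have h26 : ((pvOff t j : Int)) + (PySem.Str.len word + PySem.Str.len gold + 1) + 26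
            = ((pvOff t (j + 1) : Int)) + 25 := by omega
        rw [h26]
        simp [List.append_assoc]
      · rw [if_neg hne, if_neg hne, hsucc]

-- ===== VERDICT (by name: the statement is the Claim_ definition above) =====
theorem error_list_spec : Claim_equal_error_list := by
  intro train_sents test_sents _hdom hpre
  unfold Spec_error_list error_list error_list_alt
  apply PySem.List.foldl_congr_mem
  intro errors pr hmem
  have hlen := hpre pr hmem
  have h0 : ((pvOff pr.1 0 : Int)) = 0 := by simp [pvOff]
  have := pv_inner pr.1 pr.2 hlen pr.1 pr.2 0 (by simp) (by simp) errors
  rw [Nat.cast_zero] at this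
  rw [this, h0]
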